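-- pv_equiv track=rewrite | github.com/onetest-ai/Octo | octo/ui.py | _shorten_model
-- ===== SOURCE A (Python) =====
-- def _shorten_model(model: str) -> str:
--     """Shorten Bedrock model IDs for display."""
--     if "." in model:
--         model = model.split(".")[-1]
--     parts = model.split("-")
--     for i, p in enumerate(parts):
--         cleaned = p.split(":")[0]
--         if len(cleaned) == 8 and cleaned.isdigit():
--             return "-".join(parts[:i])
--     return model
-- ===== SOURCE B (Python) =====
-- def _shorten_model(model: str) -> str:
--     """Shorten Bedrock model IDs for display (single character scan instead of split/enumerate/join)."""
--     if "." in model: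
--         model = model.split(".")[-1]
--     out = []        # chars of the tokens already passed, with separators
--     first = True    # no token finished yet
--     cur = []        # chars of the current token
--     cnt = 0         # number of chars of cur before the first ':'
--     digits = True   # all of those chars are digits
--     colon = False   # cur contains a ':'
--     for ch in model + "-":
--         if ch == "-":
--             if cnt == 8 and digits:
--                 return "".join(out)
--             if not first:
--                 out.append("-")
--             out.extend(cur)
--             first = False
--             cur = []
--             cnt = 0
--             digits = True
--             colon = False
--         else:
--             cur.append(ch)
--             if not colon:
--                 if ch == ":":
--                     colon = True
--                 else:
--                     cnt += 1
--                     digits = digits and ch.isdigit()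
--     return model
-- ===== Notes on version B (the rewrite author's own statement) =====
-- stated objective: alternative
-- what changed: Keeps the dot-stripping but replaces the list-of-parts loop (split on dashes, enumerate, join of a slice) with a single left-to-right character scan that tracks the current token's pre-colon digit count and accumulates the joined prefix as it goes.
import Mathlib
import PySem

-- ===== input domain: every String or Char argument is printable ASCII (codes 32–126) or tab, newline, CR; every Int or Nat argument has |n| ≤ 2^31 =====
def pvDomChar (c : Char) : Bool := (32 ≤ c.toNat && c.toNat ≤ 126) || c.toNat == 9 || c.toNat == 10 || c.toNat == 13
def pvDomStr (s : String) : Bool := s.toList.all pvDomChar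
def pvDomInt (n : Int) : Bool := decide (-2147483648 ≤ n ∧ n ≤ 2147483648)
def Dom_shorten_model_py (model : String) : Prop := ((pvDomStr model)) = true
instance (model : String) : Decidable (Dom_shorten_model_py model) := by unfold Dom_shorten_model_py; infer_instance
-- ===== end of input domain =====

-- B keeps A's dot-stripping but replaces the split/enumerate/join-of-slice loop by a single
-- character scan that accumulates the joined prefix as it goes (alternative decomposition, same cost).

-- ===== PORT A =====
-- cleaned = p.split(":")[0]; len(cleaned) == 8 and cleaned.isdigit()
-- (split on a nonempty separator never returns an empty list, so [0] is headD)
def pvDatelike (p : List Char) : Bool :=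
  let cleaned := (PySem.Chars.splitOn p [':']).headD []
  cleaned.length == 8 && PySem.Chars.strIsdigit cleaned

-- the 'for i, p in enumerate(parts)' loop; returns some(join) on early return, none on fall-through
def pvAGo (full : List (List Char)) : Nat → List (List Char) → Option (List Char)
  | _, [] => none
  | i, p :: ps =>
    if pvDatelike p then some (PySem.Chars.join ['-'] (full.take i)) else pvAGo full (i + 1) ps

def shorten_model_py (model : String) : String :=
  let cs := model.toList
  -- if "." in model: model = model.split(".")[-1]   (split never returns [], so [-1] is getLastD)
  let cs := if PySem.Chars.isIn ['.'] cs then (PySem.Chars.splitOn cs ['.']).getLastD [] else cs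
  let parts := PySem.Chars.splitOn cs ['-']
  match pvAGo parts 0 parts with
  | some r => String.ofList r
  | none => String.ofList cs

-- ===== PORT B =====
-- Source B's character scan over the model with a trailing separator appended;
-- out/first/cur/cnt/digits/colon are Source B's loop variables
def pvBGo (orig : List Char) :
    List Char → List Char → Bool → List Char → Nat → Bool → Bool → List Char
  | [], _, _, _, _, _, _ => orig
  | ch :: rest, out, first, cur, cnt, digits, colon =>
    if ch = '-' then
      if cnt == 8 && digits then out
      else pvBGo orig rest ((if first then out else out ++ ['-']) ++ cur) false [] 0 true false
    else
      if colon then pvBGo orig rest out first (cur ++ [ch]) cnt digits colon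
      else if ch = ':' then pvBGo orig rest out first (cur ++ [ch]) cnt digits true
      else pvBGo orig rest out first (cur ++ [ch]) (cnt + 1)
             (digits && PySem.Chars.isdigit ch) colon

def shorten_model_py_alt (model : String) : String :=
  let cs := model.toList
  let cs := if PySem.Chars.isIn ['.'] cs then (PySem.Chars.splitOn cs ['.']).getLastD [] else cs
  String.ofList (pvBGo cs (cs ++ ['-']) [] true [] 0 true false)

-- ===== PRECONDITION & SPEC =====
def Spec_shorten_model_py (model : String) (out : String) : Prop := out = shorten_model_py_alt model
instance (model : String) (out : String) : Decidable (Spec_shorten_model_py model out) := by unfold Spec_shorten_model_py; infer_instance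

-- ===== CLAIM (what is proved, stated in full; the proofs are below) =====
def Claim_equal_shorten_model_py : Prop := ∀ (model : String), Dom_shorten_model_py model → Spec_shorten_model_py model (shorten_model_py model)

-- ===== LEMMAS AND PROOFS =====

-- clean structural form of splitOn on a one-char separator
def pvTok (c : Char) : List Char → List Char → List (List Char)
  | [], cur => [cur]
  | a :: rest, cur => if a = c then cur :: pvTok c rest [] else pvTok c rest (cur ++ [a])

theorem pvGo_spec (c : Char) (fuel : Nat) :
    ∀ (l : List Char) (cur : List Char) (acc : List (List Char)), l.length ≤ fuel →
      PySem.Chars.splitOn.go [c] fuel l cur acc = acc.reverse ++ pvTok c l cur.reverse := by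
  induction fuel with
  | zero =>
    intro l cur acc h
    have : l = [] := List.eq_nil_of_length_eq_zero (Nat.le_zero.mp h)
    subst this
    simp [PySem.Chars.splitOn.go, pvTok]
  | succ n ih =>
    intro l cur acc h
    cases l with
    | nil => simp [PySem.Chars.splitOn.go, pvTok]
    | cons a rest =>
      by_cases hc : a = c
      · subst hc
        have hpre : List.isPrefixOf [a] (a :: rest) = true := by
          simp [List.isPrefixOf]
        simp only [PySem.Chars.splitOn.go, hpre, if_pos]
        rw [show List.drop [a].length (a :: rest) = rest from rfl]
        rw [ih rest [] (cur.reverse :: acc) (by simpa using Nat.le_of_succ_le_succ h)]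
        simp [pvTok]
      · have hpre : List.isPrefixOf [c] (a :: rest) = false := by
          simp [List.isPrefixOf, BEq.beq]
          intro hh; exact absurd hh.symm hc
        simp only [PySem.Chars.splitOn.go, hpre]
        rw [if_neg (by simp)]
        rw [ih rest (a :: cur) acc (by simpa using Nat.le_of_succ_le_succ h)]
        simp [pvTok, hc]
  -- note: branch shape may need adjustment after seeing goals

theorem pvSplitOn_eq (c : Char) (l : List Char) :
    PySem.Chars.splitOn l [c] = pvTok c l [] := by
  have := pvGo_spec c (l.length + 1) l [] [] (by omega)
  simpa [PySem.Chars.splitOn] using this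

-- head of pvTok is the accumulated prefix plus takeWhile (· ≠ c)
theorem pvTok_head (c : Char) :
    ∀ (l acc : List Char), (pvTok c l acc).headD [] = acc ++ l.takeWhile (fun x => x ≠ c) := by
  intro l
  induction l with
  | nil => intro acc; simp [pvTok]
  | cons a rest ih =>
    intro acc
    by_cases hc : a = c
    · subst hc; simp [pvTok, List.takeWhile]
    · simp only [pvTok, if_neg hc]
      rw [ih (acc ++ [a])]
      simp [hc]

-- the date test, expressed on cur's pre-colon prefix
theorem pvDatelike_eq (cur : List Char) :
    pvDatelike cur =
      (((cur.takeWhile (fun x => x ≠ ':')).length == 8) &&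
        (cur.takeWhile (fun x => x ≠ ':')).all PySem.Chars.isdigit) := by
  unfold pvDatelike
  rw [pvSplitOn_eq, pvTok_head]
  simp only [List.nil_append]
  set tw := cur.takeWhile (fun x => x ≠ ':') with htw
  by_cases h8 : tw.length = 8
  · have hne : tw ≠ [] := by intro h; rw [h] at h8; simp at h8
    simp [PySem.Chars.strIsdigit, h8, hne]
  · have : (tw.length == 8) = false := by simp [h8]
    rw [this]; simp

-- first date-like token: the list of tokens before it
def pvFp : List (List Char) → Option (List (List Char))
  | [] => none
  | p :: ps => if pvDatelike p then some [] else (pvFp ps).map (p :: ·)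

theorem pvAGo_eq :
    ∀ (ps full : List (List Char)) (i : Nat), full.drop i = ps →
      pvAGo full i ps =
        (pvFp ps).map (fun pre => PySem.Chars.join ['-'] (full.take i ++ pre)) := by
  intro ps
  induction ps with
  | nil => intro full i h; simp [pvAGo, pvFp]
  | cons p ps ih =>
    intro full i h
    have hi : full[i]? = some p := by
      have h0 : (full.drop i)[0]? = full[i]? := by
        simp [List.getElem?_drop]
      rw [← h0, h]
      rfl
    have hdrop : full.drop (i + 1) = ps := by
      have h' : List.drop 1 (List.drop i full) = ps := by rw [h]; rfl
      rwa [List.drop_drop] at h'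
    have htake : full.take (i + 1) = full.take i ++ [p] := by
      rw [List.take_add_one, hi]
      rfl
    by_cases hd : pvDatelike p
    · simp [pvAGo, pvFp, hd]
    · simp only [pvAGo, pvFp, if_neg hd]
      rw [ih full (i + 1) hdrop]
      cases hfp : pvFp ps with
      | none => simp
      | some pre => simp [htake]

-- takeWhile facts about the scanned token
theorem pvTw_not_contains (cur : List Char) (h : cur.contains ':' = false) :
    cur.takeWhile (fun x => x ≠ ':') = cur := by
  have hm : ':' ∉ cur := by simpa using h
  rw [List.takeWhile_eq_self_iff]
  intro x hx
  simp only [decide_eq_true_eq]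
  intro hxc
  exact hm (hxc ▸ hx)

theorem pvTw_contains (cur : List Char) (a : Char) (h : cur.contains ':' = true) :
    (cur ++ [a]).takeWhile (fun x => x ≠ ':') = cur.takeWhile (fun x => x ≠ ':') := by
  have hm : ':' ∈ cur := by simpa using h
  rw [List.takeWhile_append, if_neg ?_]
  intro hlen
  have heq : cur.takeWhile (fun x => x ≠ ':') = cur :=
    (List.takeWhile_prefix _).eq_of_length hlen
  have := List.mem_takeWhile_imp (heq ▸ hm)
  simp at this

-- glue: what B's accumulator state contributes in front of the remaining prefix tokens
def pvGlue (out : List Char) (first : Bool) (pre : List (List Char)) : List Char :=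
  match pre with
  | [] => out
  | p :: ps => (if first then out else out ++ ['-']) ++ PySem.Chars.join ['-'] (p :: ps)

theorem pvGlue_step (out cur : List Char) (first : Bool) (pre : List (List Char)) :
    pvGlue out first (cur :: pre) = pvGlue ((if first then out else out ++ ['-']) ++ cur) false pre := by
  cases pre with
  | nil => simp [pvGlue, PySem.Chars.join_singleton]
  | cons q t => simp [pvGlue, PySem.Chars.join_cons_cons]

theorem pvBGo_eq (orig : List Char) :
    ∀ (rest cur out : List Char) (first : Bool),
      pvBGo orig (rest ++ ['-']) out first cur
        (cur.takeWhile (fun x => x ≠ ':')).length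
        ((cur.takeWhile (fun x => x ≠ ':')).all PySem.Chars.isdigit)
        (cur.contains ':')
      = match pvFp (pvTok '-' rest cur) with
        | none => orig
        | some pre => pvGlue out first pre := by
  intro rest
  induction rest with
  | nil =>
    intro cur out first
    simp only [List.nil_append, pvBGo, pvTok]
    rw [show ((cur.takeWhile (fun x => x ≠ ':')).length == 8 &&
        (cur.takeWhile (fun x => x ≠ ':')).all PySem.Chars.isdigit) = pvDatelike cur from
      (pvDatelike_eq cur).symm]
    by_cases hd : pvDatelike cur
    · simp [pvFp, hd, pvGlue]
    · simp [pvFp, hd]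
  | cons a rest ih =>
    intro cur out first
    by_cases ha : a = '-'
    · subst ha
      simp only [List.cons_append, pvBGo, pvTok]
      rw [show ((cur.takeWhile (fun x => x ≠ ':')).length == 8 &&
          (cur.takeWhile (fun x => x ≠ ':')).all PySem.Chars.isdigit) = pvDatelike cur from
        (pvDatelike_eq cur).symm]
      by_cases hd : pvDatelike cur
      · simp [pvFp, hd, pvGlue]
      · have hcall := ih [] ((if first then out else out ++ ['-']) ++ cur) false
        simp only [List.takeWhile_nil, List.length_nil, List.all_nil, List.contains_nil] at hcall
        simp only [if_neg hd, hcall]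
        cases hfp : pvFp (pvTok '-' rest []) with
        | none => simp [pvFp, hd, hfp]
        | some pre => simp [pvFp, hd, hfp, pvGlue_step]
    · simp only [pvTok, if_neg ha]
      simp only [List.cons_append, pvBGo, if_neg ha]
      by_cases hcol : cur.contains ':' = true
      · have h1 : (cur ++ [a]).takeWhile (fun x => x ≠ ':') = cur.takeWhile (fun x => x ≠ ':') :=
          pvTw_contains cur a hcol
        have h2 : (cur ++ [a]).contains ':' = true := by
          simp only [List.contains_append, hcol, Bool.true_or]
        have hrec := ih (cur ++ [a]) out first
        rw [h1, h2] at hrec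
        rw [hcol, if_pos rfl]
        exact hrec
      · have hcolf : cur.contains ':' = false := by
          cases hcc : cur.contains ':' with
          | true => exact absurd hcc hcol
          | false => rfl
        have hcur : cur.takeWhile (fun x => x ≠ ':') = cur := pvTw_not_contains cur hcolf
        rw [hcolf, if_neg (by simp)]
        by_cases hca : a = ':'
        · subst hca
          have h1 : (cur ++ [':']).takeWhile (fun x => x ≠ ':') = cur := by
            rw [List.takeWhile_append, hcur]
            simp
          have h2 : (cur ++ [':']).contains ':' = true := by simp
          have hrec := ih (cur ++ [':']) out first
          rw [h1, h2] at hrec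
          rw [if_pos rfl, hcur]
          exact hrec
        · have h1 : (cur ++ [a]).takeWhile (fun x => x ≠ ':') = cur ++ [a] := by
            rw [List.takeWhile_append, hcur]
            simp [hca]
          have h2 : (cur ++ [a]).contains ':' = false := by
            simp only [List.contains_append, hcolf, Bool.false_or, List.contains_cons,
              List.contains_nil, Bool.or_false]
            simp [BEq.beq]
            exact fun hh => absurd hh.symm hca
          have hrec := ih (cur ++ [a]) out first
          rw [h1, h2] at hrec
          rw [if_neg hca, hcur]
          simp only [List.length_append, List.length_cons, List.length_nil, List.all_append,
            List.all_cons, List.all_nil, Bool.and_true] at hrec ⊢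
          exact hrec

-- ===== VERDICT (by name: the statement is the Claim_ definition above) =====
theorem shorten_model_py_spec : Claim_equal_shorten_model_py := by
  intro model _
  unfold Spec_shorten_model_py shorten_model_py shorten_model_py_alt
  dsimp only
  set cs := (if PySem.Chars.isIn ['.'] model.toList
      then (PySem.Chars.splitOn model.toList ['.']).getLastD [] else model.toList) with hcs
  have hb := pvBGo_eq cs cs [] [] true
  simp only [List.takeWhile_nil, List.length_nil, List.all_nil, List.contains_nil] at hb
  have ha := pvAGo_eq (pvTok '-' cs []) (pvTok '-' cs []) 0 (by simp)
  rw [pvSplitOn_eq, ha, hb]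
  cases hfp : pvFp (pvTok '-' cs []) with
  | none => simp
  | some pre =>
    have hg : pvGlue [] true pre = PySem.Chars.join ['-'] pre := by
      cases pre <;> simp [pvGlue, PySem.Chars.join_nil]
    simp [hg]
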